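-- pv_equiv track=rewrite | github.com/frameprotocol/frame-symbolic-model | tokenizer/symbolic_pre.py | symbolic_scan
-- ===== SOURCE A (Python) =====
-- def symbolic_scan(s: str) -> list[str]:
--     """
--     Split a program into meaningful atoms: predicates (memory.store), ; : = -> * $N,
--     quoted strings, leading program dot, etc.
--     """
--     t: list[str] = []
--     i = 0
--     n = len(s)
--     while i < n:
--         if s[i].isspace():
--             i += 1
--             continue
--         if s.startswith("->", i):
--             t.append("->")
--             i += 2
--             continue
--         if s[i] == ";":
--             t.append(";")
--             i += 1
--             continue
--         if s[i] == "*":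
--             t.append("*")
--             i += 1
--             continue
--         if s[i] == "$" and i + 1 < n and s[i + 1].isdigit():
--             j = i + 1
--             while j < n and s[j].isdigit():
--                 j += 1
--             t.append(s[i:j])
--             i = j
--             continue
--         if s[i] == '"':
--             j = i + 1
--             esc = False
--             while j < n:
--                 if esc:
--                     esc = False
--                     j += 1
--                     continue
--                 if s[j] == "\\":
--                     esc = True
--                     j += 1
--                     continue
--                 if s[j] == '"':
--                     j += 1
--                     break
--                 j += 1
--             t.append(s[i:j])
--             i = j
--             continue
--         if s[i] == ":":
--             t.append(":")
--             i += 1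
--             continue
--         if s[i] == "=":
--             t.append("=")
--             i += 1
--             continue
--         if s[i] == "." and (i == 0 or s[i - 1].isspace()):
--             t.append(".")
--             i += 1
--             continue
--         if s[i].isalpha() or s[i] == "_":
--             j = i + 1
--             while j < n and (s[j].isalnum() or s[j] in "._"):
--                 j += 1
--             t.append(s[i:j])
--             i = j
--             continue
--         t.append(s[i])
--         i += 1
--     return t
-- ===== SOURCE B (Python) =====
-- def symbolic_scan(s: str) -> list[str]:
--     """One-pass character-at-a-time state machine (no index arithmetic, no inner loops)."""
--     DEF, IDENT, DSTART, DNUM, STR, DASH = range(6)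
--     t: list[str] = []
--     mode = DEF
--     buf = ""
--     esc = False
--     for c in s:
--         if mode == IDENT:
--             if c.isalnum() or c in "._":
--                 buf += c
--                 continue
--             t.append(buf)
--             mode = DEF
--         elif mode == DNUM:
--             if c.isdigit():
--                 buf += c
--                 continue
--             t.append(buf)
--             mode = DEF
--         elif mode == DSTART:
--             if c.isdigit():
--                 buf += c
--                 mode = DNUM
--                 continue
--             t.append(buf)
--             mode = DEF
--         elif mode == DASH:
--             mode = DEF
--             if c == ">":
--                 t.append("->")
--                 continue
--             t.append("-")
--         elif mode == STR:
--             buf += c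
--             if esc:
--                 esc = False
--             elif c == "\\":
--                 esc = True
--             elif c == '"':
--                 t.append(buf)
--                 mode = DEF
--             continue
--         # mode == DEF: dispatch on the character itself
--         if c.isspace():
--             continue
--         if c == "-":
--             mode = DASH
--         elif c == "$":
--             mode, buf = DSTART, "$"
--         elif c == '"':
--             mode, buf, esc = STR, '"', False
--         elif c.isalpha() or c == "_":
--             mode, buf = IDENT, c
--         else:
--             t.append(c)
--     if mode in (IDENT, DSTART, DNUM, STR):
--         t.append(buf)
--     elif mode == DASH:
--         t.append("-")
--     return t
-- ===== Notes on version B (the rewrite author's own statement) =====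
-- stated objective: simpler
-- what changed: Replaced A's index-based cursor with lookahead (startswith, inner while-loops re-scanning s[i:j]) by a single char-at-a-time finite state machine: one fold over the characters with a mode/buffer state and no index arithmetic; the redundant leading-dot and per-punctuation branches collapse into the catch-all.
import Mathlib
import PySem

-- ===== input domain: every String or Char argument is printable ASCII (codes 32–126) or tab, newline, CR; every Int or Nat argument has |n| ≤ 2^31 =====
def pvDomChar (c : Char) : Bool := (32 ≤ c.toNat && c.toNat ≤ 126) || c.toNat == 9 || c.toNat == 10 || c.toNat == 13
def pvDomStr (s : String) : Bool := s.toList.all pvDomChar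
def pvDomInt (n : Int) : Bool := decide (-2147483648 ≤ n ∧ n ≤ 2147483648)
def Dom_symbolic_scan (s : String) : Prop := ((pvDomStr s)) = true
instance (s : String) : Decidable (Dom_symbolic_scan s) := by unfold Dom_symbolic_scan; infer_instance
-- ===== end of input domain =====

-- B replaces A's index-based cursor with lookahead and inner while-loops by a single
-- char-at-a-time finite state machine (one fold, a mode/buffer state, no index arithmetic).

-- ===== PORT A =====
-- A's inner while-loops as span helpers on the remaining characters:
-- 'while j < n and s[j].isdigit(): j += 1'  →  (consumed, rest)
def pvSpanDigits : List Char → List Char × List Char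
  | [] => ([], [])
  | c :: r =>
    if PySem.Chars.isdigit c then
      let p := pvSpanDigits r; (c :: p.1, p.2)
    else ([], c :: r)

-- 'while j < n and (s[j].isalnum() or s[j] in "._"): j += 1'
def pvSpanIdent : List Char → List Char × List Char
  | [] => ([], [])
  | c :: r =>
    if PySem.Chars.isalnum c || c == '.' || c == '_' then
      let p := pvSpanIdent r; (c :: p.1, p.2)
    else ([], c :: r)

-- A's quoted-string while-loop with the esc flag; returns (consumed incl. closing quote, rest)
def pvSpanStr : List Char → Bool → List Char × List Char
  | [], _ => ([], [])
  | c :: r, esc =>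
    if esc then let p := pvSpanStr r false; (c :: p.1, p.2)
    else if c == '\\' then let p := pvSpanStr r true; (c :: p.1, p.2)
    else if c == '"' then ([c], r)
    else let p := pvSpanStr r false; (c :: p.1, p.2)

theorem pvSpanDigits_len (l : List Char) : (pvSpanDigits l).2.length ≤ l.length := by
  induction l with
  | nil => simp [pvSpanDigits]
  | cons c r ih => simp only [pvSpanDigits]; split <;> simp <;> omega

theorem pvSpanIdent_len (l : List Char) : (pvSpanIdent l).2.length ≤ l.length := by
  induction l with
  | nil => simp [pvSpanIdent]
  | cons c r ih => simp only [pvSpanIdent]; split <;> simp <;> omega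

theorem pvSpanStr_len (l : List Char) (esc : Bool) : (pvSpanStr l esc).2.length ≤ l.length := by
  induction l generalizing esc with
  | nil => simp [pvSpanStr]
  | cons c r ih =>
    simp only [pvSpanStr]
    split
    · have := ih false; simp; omega
    · split
      · have := ih true; simp; omega
      · split
        · simp
        · have := ih false; simp; omega

-- A's main while-loop; 'prev' is s[i-1] (none at the start), read only by the leading-dot test.
def pvScanA : List Char → Option Char → List String
  | [], _ => []
  | c :: rest, prev =>
    if PySem.Chars.isspace c then pvScanA rest (some c)
    else if c == '-' && rest.head? == some '>' then
      "->" :: pvScanA rest.tail (some '>')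
    else if c == ';' then ";" :: pvScanA rest (some c)
    else if c == '*' then "*" :: pvScanA rest (some c)
    else if c == '$' && (match rest.head? with | some d => PySem.Chars.isdigit d | none => false) then
      let p := pvSpanDigits rest
      String.mk ('$' :: p.1) :: pvScanA p.2 (some (p.1.getLastD '$'))
    else if c == '"' then
      let p := pvSpanStr rest false
      String.mk ('"' :: p.1) :: pvScanA p.2 (some (('"' :: p.1).getLastD '"'))
    else if c == ':' then ":" :: pvScanA rest (some c)
    else if c == '=' then "=" :: pvScanA rest (some c)
    else if c == '.' && (match prev with | none => true | some d => PySem.Chars.isspace d) then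
      "." :: pvScanA rest (some c)
    else if PySem.Chars.isalpha c || c == '_' then
      let p := pvSpanIdent rest
      String.mk (c :: p.1) :: pvScanA p.2 (some ((c :: p.1).getLastD c))
    else
      String.mk [c] :: pvScanA rest (some c)
termination_by l _ => l.length
decreasing_by
  all_goals
    (have h1 := pvSpanDigits_len rest
     have h2 := pvSpanStr_len rest false
     have h3 := pvSpanIdent_len rest
     simp_all [List.length_tail]
     try omega)

def symbolic_scan (s : String) : List String := pvScanA s.toList none

-- ===== PORT B =====
-- state = (t, mode, buf, esc); modes: 0 DEF, 1 IDENT, 2 DSTART, 3 DNUM, 4 STR, 5 DASH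
def pvDefHandle (t : List String) (buf : List Char) (esc : Bool) (c : Char) :
    List String × Nat × List Char × Bool :=
  if PySem.Chars.isspace c then (t, 0, buf, esc)
  else if c == '-' then (t, 5, buf, esc)
  else if c == '$' then (t, 2, ['$'], esc)
  else if c == '"' then (t, 4, ['"'], false)
  else if PySem.Chars.isalpha c || c == '_' then (t, 1, [c], esc)
  else (t ++ [String.mk [c]], 0, buf, esc)

def pvStepB (st : List String × Nat × List Char × Bool) (c : Char) :
    List String × Nat × List Char × Bool :=
  match st with
  | (t, mode, buf, esc) =>
    if mode == 1 then
      if PySem.Chars.isalnum c || c == '.' || c == '_' then (t, 1, buf ++ [c], esc)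
      else pvDefHandle (t ++ [String.mk buf]) buf esc c
    else if mode == 3 then
      if PySem.Chars.isdigit c then (t, 3, buf ++ [c], esc)
      else pvDefHandle (t ++ [String.mk buf]) buf esc c
    else if mode == 2 then
      if PySem.Chars.isdigit c then (t, 3, buf ++ [c], esc)
      else pvDefHandle (t ++ [String.mk buf]) buf esc c
    else if mode == 5 then
      if c == '>' then (t ++ ["->"], 0, buf, esc)
      else pvDefHandle (t ++ ["-"]) buf esc c
    else if mode == 4 then
      let buf' := buf ++ [c]
      if esc then (t, 4, buf', false)
      else if c == '\\' then (t, 4, buf', true)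
      else if c == '"' then (t ++ [String.mk buf'], 0, buf', esc)
      else (t, 4, buf', esc)
    else pvDefHandle t buf esc c

def pvFlushB (st : List String × Nat × List Char × Bool) : List String :=
  match st with
  | (t, mode, buf, _) =>
    if mode == 1 || mode == 2 || mode == 3 || mode == 4 then t ++ [String.mk buf]
    else if mode == 5 then t ++ ["-"]
    else t

def symbolic_scan_alt (s : String) : List String :=
  pvFlushB (s.toList.foldl pvStepB ([], 0, [], false))

-- ===== PRECONDITION & SPEC =====
def Spec_symbolic_scan (s : String) (out : List String) : Prop := out = symbolic_scan_alt s
instance (s : String) (out : List String) : Decidable (Spec_symbolic_scan s out) := by unfold Spec_symbolic_scan; infer_instance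

-- ===== CLAIM (what is proved, stated in full; the proofs are below) =====
def Claim_equal_symbolic_scan : Prop := ∀ (s : String), Dom_symbolic_scan s → Spec_symbolic_scan s (symbolic_scan s)

-- ===== LEMMAS AND PROOFS =====

theorem pvStepB_def (t : List String) (buf : List Char) (esc : Bool) (c : Char) :
    pvStepB (t, 0, buf, esc) c = pvDefHandle t buf esc c := by
  simp [pvStepB]

theorem pvFoldIdent (l : List Char) : ∀ t buf esc,
    pvFlushB (List.foldl pvStepB (t, 1, buf, esc) l) =
    pvFlushB (List.foldl pvStepB (t ++ [String.mk (buf ++ (pvSpanIdent l).1)], 0,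
              buf ++ (pvSpanIdent l).1, esc) (pvSpanIdent l).2) := by
  induction l with
  | nil => intro t buf esc; simp [pvSpanIdent, pvFlushB]
  | cons c r ih =>
    intro t buf esc
    by_cases h : (PySem.Chars.isalnum c || c == '.' || c == '_') = true
    · simp only [pvSpanIdent, List.foldl_cons, pvStepB, h]
      norm_num
      rw [ih t (buf ++ [c]) esc]
      simp
    · simp only [pvSpanIdent, List.foldl_cons, pvStepB, h]
      norm_num [pvStepB_def, h]

theorem pvFoldDnum (l : List Char) : ∀ t buf esc,
    pvFlushB (List.foldl pvStepB (t, 3, buf, esc) l) =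
    pvFlushB (List.foldl pvStepB (t ++ [String.mk (buf ++ (pvSpanDigits l).1)], 0,
              buf ++ (pvSpanDigits l).1, esc) (pvSpanDigits l).2) := by
  induction l with
  | nil => intro t buf esc; simp [pvSpanDigits, pvFlushB]
  | cons c r ih =>
    intro t buf esc
    by_cases h : PySem.Chars.isdigit c = true
    · simp only [pvSpanDigits, List.foldl_cons, pvStepB, h]
      norm_num
      rw [ih t (buf ++ [c]) esc]
      simp
    · simp only [pvSpanDigits, List.foldl_cons, pvStepB, h]
      norm_num [pvStepB_def, h]

theorem pvFoldStr (l : List Char) : ∀ t buf esc,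
    pvFlushB (List.foldl pvStepB (t, 4, buf, esc) l) =
    pvFlushB (List.foldl pvStepB (t ++ [String.mk (buf ++ (pvSpanStr l esc).1)], 0,
              buf ++ (pvSpanStr l esc).1, false) (pvSpanStr l esc).2) := by
  induction l with
  | nil => intro t buf esc; simp [pvSpanStr, pvFlushB]
  | cons c r ih =>
    intro t buf esc
    cases esc with
    | true =>
      simp only [pvSpanStr, List.foldl_cons, pvStepB]
      norm_num
      rw [ih t (buf ++ [c]) false]
      simp
    | false =>
      by_cases h1 : c = '\\'
      · subst h1
        simp only [pvSpanStr, List.foldl_cons, pvStepB]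
        norm_num
        rw [ih t (buf ++ ['\\']) true]
        simp
      · by_cases h2 : c = '"'
        · subst h2
          simp [pvSpanStr, pvStepB, h1]
        · have e1 : (c == '\\') = false := by simp [h1]
          have e2 : (c == '"') = false := by simp [h2]
          simp only [pvSpanStr, List.foldl_cons, pvStepB, e1, e2]
          norm_num
          rw [ih t (buf ++ [c]) false]
          simp

theorem pvMainAux : ∀ n (l : List Char), l.length ≤ n → ∀ t buf esc prev,
    pvFlushB (List.foldl pvStepB (t, 0, buf, esc) l) = t ++ pvScanA l prev := by
  intro n
  induction n with
  | zero =>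
    intro l hl t buf esc prev
    have : l = [] := by cases l <;> simp_all
    subst this
    simp [pvScanA, pvFlushB]
  | succ n ih =>
    intro l hl t buf esc prev
    cases l with
    | nil => simp [pvScanA, pvFlushB]
    | cons c r =>
      have hr : r.length ≤ n := by simp at hl; omega
      rw [List.foldl_cons, pvStepB_def]
      by_cases hsp : PySem.Chars.isspace c = true
      · rw [pvScanA.eq_def]
        simp only [hsp, if_true, pvDefHandle]
        exact ih r hr t buf esc (some c)
      · by_cases h1 : c = '-'
        · subst h1
          rw [pvScanA.eq_def]
          simp only [pvDefHandle]
          norm_num [show PySem.Chars.isspace '-' = false from by decide, show PySem.Chars.isalpha '-' = false from by decide, show ¬('-' = ';') from by decide, show ¬('-' = '*') from by decide, show ¬('-' = '$') from by decide, show ¬('-' = '\"') from by decide, show ¬('-' = ':') from by decide, show ¬('-' = '=') from by decide, show ¬('-' = '.') from by decide, show ¬('-' = '_') from by decide]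
          cases r with
          | nil => simp [pvFlushB, pvScanA, show String.mk ['-'] = "-" from rfl]
          | cons d r' =>
            have hr' : r'.length ≤ n := by simp at hl; omega
            by_cases hd : d = '>'
            · subst hd
              rw [List.foldl_cons]
              simp only [pvStepB]
              norm_num
              simpa using ih r' hr' (t ++ ["->"]) buf esc (some '>')
            · have ed : (d == '>') = false := by simp [hd]
              rw [List.foldl_cons]
              simp only [pvStepB, ed]
              norm_num [ed]
              rw [show pvDefHandle (t ++ ["-"]) buf esc d = pvStepB (t ++ ["-"], 0, buf, esc) d from (pvStepB_def _ _ _ _).symm]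
              rw [← List.foldl_cons]
              rw [ih (d :: r') (by simpa using hr) (t ++ ["-"]) buf esc (some '-')]
              simp [hd, show String.mk ['-'] = "-" from rfl]
        · by_cases h2 : c = ';'
          · subst h2
            rw [pvScanA.eq_def]
            simp only [pvDefHandle]
            norm_num [show PySem.Chars.isspace ';' = false from by decide, show PySem.Chars.isalpha ';' = false from by decide, show ¬(';' = '-') from by decide, show ¬(';' = '*') from by decide, show ¬(';' = '$') from by decide, show ¬(';' = '\"') from by decide, show ¬(';' = ':') from by decide, show ¬(';' = '=') from by decide, show ¬(';' = '.') from by decide, show ¬(';' = '_') from by decide, show String.mk [';'] = ";" from rfl]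
            rw [ih r hr (t ++ [";"]) buf esc (some ';')]
            simp
          · by_cases h3 : c = '*'
            · subst h3
              rw [pvScanA.eq_def]
              simp only [pvDefHandle]
              norm_num [show PySem.Chars.isspace '*' = false from by decide, show PySem.Chars.isalpha '*' = false from by decide, show ¬('*' = '-') from by decide, show ¬('*' = ';') from by decide, show ¬('*' = '$') from by decide, show ¬('*' = '\"') from by decide, show ¬('*' = ':') from by decide, show ¬('*' = '=') from by decide, show ¬('*' = '.') from by decide, show ¬('*' = '_') from by decide, show String.mk ['*'] = "*" from rfl]
              rw [ih r hr (t ++ ["*"]) buf esc (some '*')]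
              simp
            · by_cases h4 : c = '$'
              · subst h4
                rw [pvScanA.eq_def]
                simp only [pvDefHandle]
                norm_num [show PySem.Chars.isspace '$' = false from by decide, show PySem.Chars.isalpha '$' = false from by decide, show ¬('$' = '-') from by decide, show ¬('$' = ';') from by decide, show ¬('$' = '*') from by decide, show ¬('$' = '\"') from by decide, show ¬('$' = ':') from by decide, show ¬('$' = '=') from by decide, show ¬('$' = '.') from by decide, show ¬('$' = '_') from by decide]
                cases r with
                | nil => simp [pvFlushB, pvScanA, show String.mk ['$'] = "$" from rfl]
                | cons d r' =>
                  by_cases hd : PySem.Chars.isdigit d = true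
                  · rw [List.foldl_cons]
                    simp only [pvStepB, hd]
                    norm_num [hd]
                    have key := pvFoldDnum r' t ['$', d] esc
                    rw [key]
                    have hlen : (pvSpanDigits r').2.length ≤ n := le_trans (pvSpanDigits_len r') (by simp at hl; omega)
                    rw [ih (pvSpanDigits r').2 hlen _ _ _ (some ((d :: (pvSpanDigits r').1).getLastD '$'))]
                    simp [pvSpanDigits, hd]
                  · rw [List.foldl_cons]
                    simp only [pvStepB, hd]
                    norm_num [hd]
                    rw [show pvDefHandle (t ++ [String.mk ['$']]) ['$'] esc d = pvStepB (t ++ [String.mk ['$']], 0, ['$'], esc) d from (pvStepB_def _ _ _ _).symm]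
                    rw [← List.foldl_cons]
                    rw [ih (d :: r') (by simpa using hr) _ _ _ (some '$')]
                    simp [show String.mk ['$'] = "$" from rfl]
              · by_cases h5 : c = '"'
                · subst h5
                  rw [pvScanA.eq_def]
                  simp only [pvDefHandle]
                  norm_num [show PySem.Chars.isspace '\"' = false from by decide, show PySem.Chars.isalpha '\"' = false from by decide, show ¬('\"' = '-') from by decide, show ¬('\"' = ';') from by decide, show ¬('\"' = '*') from by decide, show ¬('\"' = '$') from by decide, show ¬('\"' = ':') from by decide, show ¬('\"' = '=') from by decide, show ¬('\"' = '.') from by decide, show ¬('\"' = '_') from by decide]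
                  rw [pvFoldStr r t ['"'] false]
                  have hlen : (pvSpanStr r false).2.length ≤ n := le_trans (pvSpanStr_len r false) hr
                  rw [ih (pvSpanStr r false).2 hlen _ _ _ (some (('"' :: (pvSpanStr r false).1).getLastD '"'))]
                  simp
                · by_cases h6 : c = ':'
                  · subst h6
                    rw [pvScanA.eq_def]
                    simp only [pvDefHandle]
                    norm_num [show PySem.Chars.isspace ':' = false from by decide, show PySem.Chars.isalpha ':' = false from by decide, show ¬(':' = '-') from by decide, show ¬(':' = ';') from by decide, show ¬(':' = '*') from by decide, show ¬(':' = '$') from by decide, show ¬(':' = '\"') from by decide, show ¬(':' = '=') from by decide, show ¬(':' = '.') from by decide, show ¬(':' = '_') from by decide, show String.mk [':'] = ":" from rfl]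
                    rw [ih r hr (t ++ [":"]) buf esc (some ':')]
                    simp
                  · by_cases h7 : c = '='
                    · subst h7
                      rw [pvScanA.eq_def]
                      simp only [pvDefHandle]
                      norm_num [show PySem.Chars.isspace '=' = false from by decide, show PySem.Chars.isalpha '=' = false from by decide, show ¬('=' = '-') from by decide, show ¬('=' = ';') from by decide, show ¬('=' = '*') from by decide, show ¬('=' = '$') from by decide, show ¬('=' = '\"') from by decide, show ¬('=' = ':') from by decide, show ¬('=' = '.') from by decide, show ¬('=' = '_') from by decide, show String.mk ['='] = "=" from rfl]
                      rw [ih r hr (t ++ ["="]) buf esc (some '=')]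
                      simp
                    · by_cases h8 : c = '.'
                      · subst h8
                        rw [pvScanA.eq_def]
                        simp only [pvDefHandle]
                        norm_num [show PySem.Chars.isspace '.' = false from by decide, show PySem.Chars.isalpha '.' = false from by decide, show ¬('.' = '-') from by decide, show ¬('.' = ';') from by decide, show ¬('.' = '*') from by decide, show ¬('.' = '$') from by decide, show ¬('.' = '\"') from by decide, show ¬('.' = ':') from by decide, show ¬('.' = '=') from by decide, show ¬('.' = '_') from by decide, show String.mk ['.'] = "." from rfl]
                        rw [ih r hr (t ++ ["."]) buf esc (some '.')]
                        simp
                      · by_cases h9 : (PySem.Chars.isalpha c || c == '_') = true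
                        · rw [pvScanA.eq_def]
                          simp only [pvDefHandle]
                          norm_num [hsp, h1, h2, h3, h4, h5, h6, h7, h8, h9]
                          rw [pvFoldIdent r t [c] esc]
                          have hlen : (pvSpanIdent r).2.length ≤ n := le_trans (pvSpanIdent_len r) hr
                          rw [ih (pvSpanIdent r).2 hlen _ _ _ (some ((c :: (pvSpanIdent r).1).getLastD c))]
                          simp
                        · rw [pvScanA.eq_def]
                          simp only [pvDefHandle]
                          norm_num [hsp, h1, h2, h3, h4, h5, h6, h7, h8, h9]
                          rw [ih r hr (t ++ [String.mk [c]]) buf esc (some c)]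
                          simp

-- ===== VERDICT (by name: the statement is the Claim_ definition above) =====
theorem symbolic_scan_spec : Claim_equal_symbolic_scan := by
  intro s _
  unfold Spec_symbolic_scan symbolic_scan symbolic_scan_alt
  have := pvMainAux s.toList.length s.toList le_rfl [] [] false none
  simpa using this.symm
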